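-- pv_equiv track=rewrite | github.com/981377660LMT/algorithm-study | 20_杂题/牛客编程巅峰赛/105_奇怪的排序问题.py | wwork
-- ===== SOURCE A (Python) =====
-- def wwork(n: int, nums: list[int]) -> int:
--     """倒序遍历维护最小值即可"""
--     min_ = nums[-1]
--     res = 0
--     for i in range(n - 2, -1, -1):
--         cur = nums[i]
--         if cur > min_:
--             res += 1
--         else:
--             min_ = cur
--     return res
-- ===== SOURCE B (Python) =====
-- def wwork(n: int, nums: list[int]) -> int:
--     last = nums[-1]
--     pre = nums[:max(n - 1, 0)]
--     suf = [last]
--     for x in reversed(pre):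
--         suf.append(min(x, suf[-1]))
--     suf.reverse()
--     return sum(1 for v, low in zip(pre, suf[1:]) if v > low)
-- ===== Notes on version B (the rewrite author's own statement) =====
-- stated objective: alternative
-- what changed: A fuses minimum-maintenance and counting into one backward loop; B first materializes the suffix-minimum array in a right-to-left pass and then counts in a separate forward pass over zip(pre, suf[1:]).
import Mathlib
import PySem

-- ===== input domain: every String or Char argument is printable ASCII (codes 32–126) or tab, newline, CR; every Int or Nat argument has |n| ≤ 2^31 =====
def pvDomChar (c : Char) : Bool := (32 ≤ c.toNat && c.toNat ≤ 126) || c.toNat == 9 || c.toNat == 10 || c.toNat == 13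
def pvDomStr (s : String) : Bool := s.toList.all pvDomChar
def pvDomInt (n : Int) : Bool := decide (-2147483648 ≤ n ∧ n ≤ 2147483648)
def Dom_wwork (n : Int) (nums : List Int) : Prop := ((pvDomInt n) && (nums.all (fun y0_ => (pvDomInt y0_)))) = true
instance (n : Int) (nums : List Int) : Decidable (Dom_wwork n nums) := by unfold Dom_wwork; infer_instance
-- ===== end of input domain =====

-- B replaces A's fused backward min-maintaining loop by two passes: build the suffix-minimum
-- array right-to-left, then count forward over zip(pre, suf[1:]); same O(n) cost (objective: alternative).

-- ===== PORT A =====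
def wwork (n : Int) (nums : List Int) : Int :=
  let min0 := (PySem.List.pyGet? nums (-1)).getD 0   -- nums[-1]; none (IndexError) excluded by Pre_
  ((PySem.List.pyRange (n - 2) (-1) (-1)).foldl
    (fun (st : Int × Int) i =>
      let cur := (PySem.List.pyGet? nums i).getD 0   -- nums[i]; in range under Pre_
      if cur > st.1 then (st.1, st.2 + 1) else (cur, st.2))
    (min0, 0)).2

-- ===== PORT B =====
def wwork_alt (n : Int) (nums : List Int) : Int :=
  let last := (PySem.List.pyGet? nums (-1)).getD 0   -- nums[-1]; none (IndexError) excluded by Pre_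
  let pre := PySem.List.slice nums none (some (max (n - 1) 0))
  let suf := (pre.reverse.foldl
      (fun (acc : List Int) x => acc ++ [min x ((PySem.List.pyGet? acc (-1)).getD 0)])
      [last]).reverse
  (pre.zip (suf.drop 1)).foldl (fun acc p => acc + (if p.1 > p.2 then (1 : Int) else 0)) 0

-- ===== PRECONDITION & SPEC =====
-- Exactly the inputs on which the Python A returns: nums nonempty (nums[-1]) and n ≤ len(nums)+1
-- (otherwise the loop reaches an index ≥ len(nums) and nums[i] raises IndexError).
def Pre_wwork (n : Int) (nums : List Int) : Prop := nums ≠ [] ∧ n ≤ (nums.length : Int) + 1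
instance (n : Int) (nums : List Int) : Decidable (Pre_wwork n nums) := by unfold Pre_wwork; infer_instance
def pvWitness_wwork : Int × List Int := (4, [3, 1, 4, 2])

def Spec_wwork (n : Int) (nums : List Int) (out : Int) : Prop := out = wwork_alt n nums
instance (n : Int) (nums : List Int) (out : Int) : Decidable (Spec_wwork n nums out) := by unfold Spec_wwork; infer_instance

-- ===== CLAIM (what is proved, stated in full; the proofs are below) =====
def Claim_equal_wwork : Prop := ∀ (n : Int) (nums : List Int), Dom_wwork n nums → Pre_wwork n nums → Spec_wwork n nums (wwork n nums)

-- ===== LEMMAS AND PROOFS =====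

/-- minimum of `l` seeded with `s` -/
def fmin (l : List Int) (s : Int) : Int := l.foldr min s

/-- the suffix-minimum list: `(sufMins l s)[i] = fmin (l.drop i) s`, length `l.length + 1` -/
def sufMins : List Int → Int → List Int
  | [], s => [s]
  | x :: t, s => min x (fmin t s) :: sufMins t s

/-- reference count: elements of `l` strictly greater than the seeded min of their tail -/
def cnt : List Int → Int → Int
  | [], _ => 0
  | x :: t, s => (if x > fmin t s then 1 else 0) + cnt t s

theorem sufMins_head? (l : List Int) (s : Int) : (sufMins l s).head? = some (fmin l s) := by
  cases l <;> simp [sufMins, fmin]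

theorem sufMins_eq_cons (l : List Int) (s : Int) :
    sufMins l s = fmin l s :: (sufMins l s).drop 1 := by
  cases l <;> simp [sufMins, fmin]

/-- the A-side fold computes (seeded min, r0 + cnt) -/
theorem foldr_step (l : List Int) (s r0 : Int) :
    l.foldr (fun x (st : Int × Int) => if x > st.1 then (st.1, st.2 + 1) else (x, st.2)) (s, r0)
      = (fmin l s, r0 + cnt l s) := by
  induction l with
  | nil => simp [fmin, cnt]
  | cons x t ih =>
    simp only [List.foldr_cons, ih, cnt, fmin, List.foldr_cons]
    by_cases h : x > fmin t s
    · simp only [fmin] at h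
      simp [h, min_eq_right (le_of_lt h)]
      ring
    · simp only [fmin] at h
      simp [h, min_eq_left (le_of_not_gt h)]

/-- building B's suffix array appends exactly the reversed `sufMins` -/
theorem build_suf (l : List Int) (s : Int) :
    l.reverse.foldl
      (fun (acc : List Int) x => acc ++ [min x ((PySem.List.pyGet? acc (-1)).getD 0)])
      [s] = (sufMins l s).reverse := by
  induction l with
  | nil => simp [sufMins]
  | cons x t ih =>
    have hlast : ((sufMins t s).reverse.getLast?) = some (fmin t s) := by
      rw [List.getLast?_reverse, sufMins_head?]
    rw [List.reverse_cons, List.foldl_append, ih]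
    simp only [List.foldl_cons, List.foldl_nil, PySem.List.pyGet?_neg_one, hlast,
      Option.getD_some, sufMins, List.reverse_cons]

/-- B's counting fold over `zip l ((sufMins l s).drop 1)` computes `a + cnt l s` -/
theorem zip_count (l : List Int) (s : Int) : ∀ (a : Int),
    (l.zip ((sufMins l s).drop 1)).foldl
      (fun acc p => acc + (if p.1 > p.2 then (1 : Int) else 0)) a = a + cnt l s := by
  induction l with
  | nil => intro a; simp [sufMins, cnt]
  | cons x t ih =>
    intro a
    have h1 : (sufMins (x :: t) s).drop 1 = sufMins t s := by simp [sufMins]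
    rw [h1, sufMins_eq_cons t s]
    simp only [List.zip_cons_cons, List.foldl_cons]
    rw [ih]
    simp only [cnt]
    ring

/-- the descending index fold of A equals a foldr over the taken prefix -/
theorem desc_fold (nums : List Int) :
    ∀ (m : Nat), m ≤ nums.length → ∀ (st : Int × Int),
    ((List.range m).map (fun k : Nat => (m : Int) - 1 - (k : Int))).foldl
      (fun (st : Int × Int) i =>
        let cur := (PySem.List.pyGet? nums i).getD 0
        if cur > st.1 then (st.1, st.2 + 1) else (cur, st.2)) st
      = (nums.take m).foldr
          (fun x (st : Int × Int) => if x > st.1 then (st.1, st.2 + 1) else (x, st.2)) st := by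
  intro m
  induction m with
  | zero => intro _ st; rfl
  | succ m ih =>
    intro hm st
    have hmlt : m < nums.length := by omega
    have hrange : (List.range (m + 1)).map (fun k : Nat => ((m : Int) + 1) - 1 - (k : Int))
        = ((m : Int)) :: (List.range m).map (fun k : Nat => (m : Int) - 1 - (k : Int)) := by
      rw [List.range_succ_eq_map]
      simp only [List.map_cons, List.map_map]
      congr 1
      · push_cast; ring
      · apply List.map_congr_left
        intro k _
        simp only [Function.comp_apply]
        push_cast; ring
    have hget : (PySem.List.pyGet? nums ((m : Nat) : Int)).getD 0 = nums[m] := by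
      rw [PySem.List.pyGet?_natCast]
      simp [List.getElem?_eq_getElem hmlt]
    have htake : nums.take (m + 1) = nums.take m ++ [nums[m]] := by
      rw [List.take_add_one]
      simp [List.getElem?_eq_getElem hmlt]
    push_cast
    rw [hrange, htake, List.foldl_cons, List.foldr_append]
    simp only [hget, List.foldr_cons, List.foldr_nil]
    exact ih (by omega) _

-- ===== VERDICT (by name: the statement is the Claim_ definition above) =====
theorem wwork_spec : Claim_equal_wwork := by
  intro n nums _ hpre
  obtain ⟨hne, hlen⟩ := hpre
  unfold Spec_wwork wwork wwork_alt
  set m : Nat := (n - 1).toNat with hm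
  have hmle : m ≤ nums.length := by omega
  have hrange : PySem.List.pyRange (n - 2) (-1) (-1)
      = (List.range m).map (fun k : Nat => (m : Int) - 1 - (k : Int)) := by
    rw [PySem.List.pyRange_neg_one]
    have h2 : (n - 2 - (-1)).toNat = m := by omega
    rw [h2]
    apply List.map_congr_left
    intro k hk
    simp only [List.mem_range] at hk
    omega
  have hpre' : PySem.List.slice nums none (some (max (n - 1) 0)) = nums.take m := by
    rw [PySem.List.slice_to nums (le_max_right _ _)]
    congr 1
    omega
  simp only [hrange, hpre', desc_fold nums m hmle, build_suf, List.reverse_reverse,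
    foldr_step, zip_count]
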